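-- pv_equiv track=rewrite | github.com/inhwa1025/Algorithm-python | 2020_kakao_blind/Q1.py | solution
-- ===== SOURCE A (Python) =====
-- def solution(s):
--     n = len(s)
--     answer = n
--
--     for i in range(1, n):
--         p = 0
--         comp = ""
--         while p < n:
--             slices = s[p:p + i]
--             p += i
--             cnt = 1
--             while True:
--                 if s[p:p + i] == slices:
--                     cnt += 1
--                     p += i
--                 else:
--                     break
--
--             if cnt == 1:
--                 comp += slices
--             else:
--                 comp += str(cnt) + slices
--
--         if len(comp) < answer:
--             answer = len(comp)
--
--     return answer
-- ===== SOURCE B (Python) =====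
-- def solution(s):
--     n = len(s)
--     best = n
--     for i in range(1, n):
--         chunks = [s[j:j + i] for j in range(0, n, i)]
--         m = len(chunks)
--         breaks = [0] + [k for k in range(1, m) if chunks[k] != chunks[k - 1]] + [m]
--         runs = len(breaks) - 1
--         digits = sum(len(str(b - a)) for a, b in zip(breaks, breaks[1:]) if b - a > 1)
--         best = min(best, n - i * (m - runs) + digits)
--     return best
-- ===== Notes on version B (the rewrite author's own statement) =====
-- stated objective: alternative
-- what changed: Instead of A's pointer/while run-length encoding that concatenates a compressed string per block size, B materialises the list of break positions (indices where consecutive chunks differ), derives run counts as pairwise differences of that list, and computes the compressed length by the closed-form identity n - i*(m - runs) + sum of digit lengths, never encoding anything.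
import Mathlib
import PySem

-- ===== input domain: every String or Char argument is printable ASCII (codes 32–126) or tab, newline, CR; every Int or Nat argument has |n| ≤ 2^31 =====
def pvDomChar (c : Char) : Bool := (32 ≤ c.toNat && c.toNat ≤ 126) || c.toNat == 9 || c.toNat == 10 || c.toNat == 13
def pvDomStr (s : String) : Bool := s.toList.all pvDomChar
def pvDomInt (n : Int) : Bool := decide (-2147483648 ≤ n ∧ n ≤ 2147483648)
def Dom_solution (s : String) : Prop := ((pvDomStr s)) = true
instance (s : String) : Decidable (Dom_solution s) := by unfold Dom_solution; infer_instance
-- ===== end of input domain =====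

-- B drops A's run-length-encoding loop (pointer + compressed-string concatenation) and instead
-- lists the break positions between unequal consecutive chunks, reads the run counts off as
-- pairwise differences, and obtains the compressed length from the identity
-- n - i*(m - runs) + digit-sum; objective: alternative (no string is ever built).

-- ===== PORT A =====
-- inner 'while True' loop: cnt/p while the next slice still equals `slices`.
-- The conjunct 'sl ≠ []' only makes the recursion total: at every call site sl is a
-- nonempty slice (Python would loop forever on sl = ""), so the condition is Python's.
def solutionCount (cs : List Char) (i : Int) (sl : List Char) (p : Int) (cnt : Int) : Int × Int :=
  if h : PySem.List.slice cs (some p) (some (p + i)) = sl ∧ sl ≠ [] then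
    solutionCount cs i sl (p + i) (cnt + 1)
  else (cnt, p)
termination_by cs.length - PySem.List.clampIdx cs.length p
decreasing_by
  have hlen := PySem.List.length_slice cs p (p + i)
  have hne : (PySem.List.slice cs (some p) (some (p + i))).length ≠ 0 := by
    simp [h.1, List.length_eq_zero_iff, h.2]
  have hle := PySem.List.clampIdx_le cs.length (p + i)
  omega

-- outer 'while p < n' loop building comp; fuel only makes it total (cs.length + 1 always suffices)
def solutionComp (cs : List Char) (i : Int) (fuel : Nat) (p : Int) (comp : List Char) : List Char :=
  match fuel with
  | 0 => comp
  | fuel + 1 =>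
    if p < (cs.length : Int) then
      let sl := PySem.List.slice cs (some p) (some (p + i))
      let r := solutionCount cs i sl (p + i) 1
      solutionComp cs i fuel r.2
        (if r.1 = 1 then comp ++ sl else comp ++ PySem.Int.toChars r.1 ++ sl)
    else comp

def solution (s : String) : Int :=
  let cs := s.toList
  let n := cs.length
  (PySem.List.pyRange 1 (n : Int) 1).foldl
    (fun answer i =>
      let comp := solutionComp cs i (n + 1) 0 []
      if (comp.length : Int) < answer then (comp.length : Int) else answer)
    (n : Int)

-- ===== PORT B =====
def solution_alt (s : String) : Int :=
  let cs := s.toList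
  let n := cs.length
  (PySem.List.pyRange 1 (n : Int) 1).foldl
    (fun best i =>
      let chunks := (PySem.List.pyRange 0 (n : Int) i).map
        (fun j => PySem.List.slice cs (some j) (some (j + i)))
      let m : Int := (chunks.length : Int)
      let breaks : List Int := [0] ++ ((PySem.List.pyRange 1 m 1).filter
          (fun k => decide (PySem.List.pyGet? chunks k ≠ PySem.List.pyGet? chunks (k - 1)))) ++ [m]
      let runs : Int := (breaks.length : Int) - 1
      let digits : Int := (((breaks.zip (PySem.List.slice breaks (some 1) none)).filter
          (fun ab => decide (1 < ab.2 - ab.1))).map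
          (fun ab => ((PySem.Int.toChars (ab.2 - ab.1)).length : Int))).sum
      min best ((n : Int) - i * (m - runs) + digits))
    (n : Int)

-- ===== PRECONDITION & SPEC =====
def Spec_solution (s : String) (out : Int) : Prop := out = solution_alt s
instance (s : String) (out : Int) : Decidable (Spec_solution s out) := by
  unfold Spec_solution; infer_instance

-- ===== CLAIM (what is proved, stated in full; the proofs are below) =====
def Claim_equal_solution : Prop := ∀ (s : String), Dom_solution s → Spec_solution s (solution s)

-- ===== LEMMAS AND PROOFS =====

-- the chunk list [s[j:j+i] for j in range(p, n, i)]
def pvChunks (cs : List Char) (i p : Int) : List (List Char) :=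
  (PySem.List.pyRange p (cs.length : Int) i).map
    (fun j => PySem.List.slice cs (some j) (some (j + i)))

-- canonical run-length encoding of a chunk list (A's comp string)
def pvEncode : List (List Char) → List Char
  | [] => []
  | c :: rest =>
    (if (rest.takeWhile (fun d => d == c)).length = 0 then c
     else PySem.Int.toChars (1 + ((rest.takeWhile (fun d => d == c)).length : Int)) ++ c)
      ++ pvEncode (rest.dropWhile (fun d => d == c))
termination_by l => l.length
decreasing_by
  have := List.length_dropWhile_le (p := fun d => d == c) (l := rest)
  simp; omega

-- the (representative, count) run list of a chunk list
def pvRuns : List (List Char) → List (List Char × Nat)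
  | [] => []
  | c :: rest =>
    (c, 1 + (rest.takeWhile (fun d => d == c)).length)
      :: pvRuns (rest.dropWhile (fun d => d == c))
termination_by l => l.length
decreasing_by
  have := List.length_dropWhile_le (p := fun d => d == c) (l := rest)
  simp; omega

-- interior break positions as computed by B for chunk list L
def pvInterior (L : List (List Char)) : List Int :=
  (PySem.List.pyRange 1 (L.length : Int) 1).filter
    (fun k => decide (PySem.List.pyGet? L k ≠ PySem.List.pyGet? L (k - 1)))

def pvDiffs (bs : List Int) : List Int :=
  (bs.zip bs.tail).map (fun ab => ab.2 - ab.1)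

lemma pvRange_pos_cons (a b s : Int) (hs : 0 < s) (hab : a < b) :
    PySem.List.pyRange a b s = a :: PySem.List.pyRange (a + s) b s := by
  rw [PySem.List.pyRange_of_pos _ _ hs, PySem.List.pyRange_of_pos _ _ hs]
  by_cases h2 : a + s < b
  · have hN : (b - a + s - 1) / s = (b - (a + s) + s - 1) / s + 1 := by
      have : b - a + s - 1 = (b - (a + s) + s - 1) + 1 * s := by ring
      rw [this, Int.add_mul_ediv_right _ _ (by omega)]
    have hpos : 0 ≤ (b - (a + s) + s - 1) / s := by
      apply Int.ediv_nonneg <;> omega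
    simp only [if_pos hab, if_pos h2, hN]
    rw [show ((b - (a + s) + s - 1) / s + 1).toNat = ((b - (a + s) + s - 1) / s).toNat + 1 by omega]
    rw [List.range_succ_eq_map]
    simp [List.map_map, Function.comp]
    intro k _; ring
  · have h1 : (b - a + s - 1) / s = 1 := by
      have : b - a + s - 1 = (b - a - 1) + 1 * s := by ring
      rw [this, Int.add_mul_ediv_right _ _ (by omega)]
      rw [Int.ediv_eq_zero_of_lt (by omega) (by omega)]; ring
    simp [if_pos hab, if_neg h2, h1, List.range_succ]

lemma pvRange_pos_nil (a b s : Int) (hs : 0 < s) (hab : b ≤ a) :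
    PySem.List.pyRange a b s = [] := by
  rw [PySem.List.pyRange_of_pos _ _ hs]
  simp [show ¬ a < b by omega]

lemma pvChunks_nil (cs : List Char) (i p : Int) (hi : 0 < i) (h : (cs.length : Int) ≤ p) :
    pvChunks cs i p = [] := by
  simp [pvChunks, pvRange_pos_nil _ _ _ hi h]

lemma pvChunks_cons (cs : List Char) (i p : Int) (hi : 0 < i) (h : p < (cs.length : Int)) :
    pvChunks cs i p
      = PySem.List.slice cs (some p) (some (p + i)) :: pvChunks cs i (p + i) := by
  simp [pvChunks, pvRange_pos_cons _ _ _ hi h]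

lemma pvSlice_empty {α : Type} (cs : List α) (p q : Int) (hp : 0 ≤ p) (h : (cs.length : Int) ≤ p) :
    PySem.List.slice cs (some p) (some q) = [] := by
  have := PySem.List.length_slice cs p q
  have h1 := PySem.List.clampIdx_le cs.length q
  have h2 : PySem.List.clampIdx cs.length p = cs.length := by
    unfold PySem.List.clampIdx
    split_ifs <;> omega
  rw [← List.length_eq_zero_iff]
  omega

-- length of the slice s[p:p+i] for admissible p, as an Int
lemma pvSlice_len (cs : List Char) (i p : Int) (hi : 0 < i) (hp : 0 ≤ p)
    (h : p < (cs.length : Int)) :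
    ((PySem.List.slice cs (some p) (some (p + i))).length : Int)
      = min (cs.length : Int) (p + i) - p := by
  have hlen := PySem.List.length_slice cs p (p + i)
  have h2 : PySem.List.clampIdx cs.length p = p.toNat := by
    unfold PySem.List.clampIdx; split_ifs <;> omega
  have h3 : (PySem.List.clampIdx cs.length (p + i) : Int) = min (cs.length : Int) (p + i) := by
    unfold PySem.List.clampIdx; split_ifs <;> omega
  omega

lemma pvSlice_ne_nil (cs : List Char) (i p : Int) (hi : 0 < i) (hp : 0 ≤ p)
    (h : p < (cs.length : Int)) :
    PySem.List.slice cs (some p) (some (p + i)) ≠ [] := by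
  have := pvSlice_len cs i p hi hp h
  intro hnil
  rw [hnil] at this
  simp at this
  omega

lemma pvDropWhile_eq_drop {α : Type} (l : List α) (p : α → Bool) :
    l.dropWhile p = l.drop (l.takeWhile p).length := by
  induction l with
  | nil => simp
  | cons a l ih => by_cases h : p a <;> simp [h, ih]

lemma pvHead_dropWhile {α : Type} (l : List α) (p : α → Bool) (d : α)
    (h : (l.dropWhile p).head? = some d) : p d = false := by
  induction l with
  | nil => simp at h
  | cons a l ih =>
    rw [List.dropWhile_cons] at h
    split at h
    · exact ih h
    · rename_i hp; simp at h; subst h; simpa using hp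

lemma pvCount_spec (cs : List Char) (i : Int) (hi : 0 < i) (sl : List Char) (hsl : sl ≠ []) :
    ∀ (L : List (List Char)) (p : Int), 0 ≤ p → L = pvChunks cs i p → ∀ cnt,
      solutionCount cs i sl p cnt
        = (cnt + ((L.takeWhile (fun d => d == sl)).length : Int),
           p + i * ((L.takeWhile (fun d => d == sl)).length : Int)) := by
  intro L
  induction L with
  | nil =>
    intro p hp hL cnt
    have hpn : (cs.length : Int) ≤ p := by
      by_contra hlt
      rw [pvChunks_cons cs i p hi (by omega)] at hL
      simp at hL
    rw [solutionCount]
    have hsle : PySem.List.slice cs (some p) (some (p + i)) = [] :=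
      pvSlice_empty cs p (p + i) hp hpn
    rw [dif_neg (by rw [hsle]; tauto)]
    simp
  | cons c L' ih =>
    intro p hp hL cnt
    have hpn : p < (cs.length : Int) := by
      by_contra hge
      rw [pvChunks_nil cs i p hi (by omega)] at hL
      simp at hL
    rw [pvChunks_cons cs i p hi hpn] at hL
    obtain ⟨hc, hL'⟩ := List.cons.injEq .. ▸ hL
    rw [solutionCount]
    by_cases hcs : c = sl
    · rw [dif_pos ⟨by rw [← hc, hcs], hsl⟩]
      rw [ih (p + i) (by omega) hL' (cnt + 1)]
      simp [hcs]
      constructor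
      · ring
      · ring
    · rw [dif_neg (by rw [← hc]; intro hh; exact hcs hh.1)]
      simp [hcs]

lemma pvChunks_drop (cs : List Char) (i : Int) (hi : 0 < i) :
    ∀ (k : Nat) (p : Int), 0 ≤ p →
      (pvChunks cs i p).drop k = pvChunks cs i (p + i * (k : Int)) := by
  intro k
  induction k with
  | zero => intro p hp; simp
  | succ k ih =>
    intro p hp
    by_cases h : p < (cs.length : Int)
    · rw [pvChunks_cons cs i p hi h, List.drop_succ_cons, ih (p + i) (by omega)]
      congr 1
      push_cast; ring
    · rw [pvChunks_nil cs i p hi (by omega), pvChunks_nil cs i _ hi (by push_cast; nlinarith)]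
      simp

lemma pvChunks_len (cs : List Char) (i : Int) (hi : 0 < i) :
    ∀ (p : Int), 0 ≤ p → (pvChunks cs i p).length ≤ cs.length - p.toNat := by
  intro p
  induction hm : cs.length - p.toNat using Nat.strong_induction_on generalizing p with
  | _ m ih =>
    intro hp
    by_cases h : p < (cs.length : Int)
    · rw [pvChunks_cons cs i p hi h]
      have h2 : cs.length - (p + i).toNat < m := by omega
      have := ih _ h2 (p + i) rfl (by omega)
      simp
      omega
    · rw [pvChunks_nil cs i p hi (by omega)]
      simp

lemma pvComp_spec (cs : List Char) (i : Int) (hi : 0 < i) :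
    ∀ (fuel : Nat) (L : List (List Char)) (p : Int) (comp : List Char),
      0 ≤ p → L = pvChunks cs i p → L.length < fuel →
      solutionComp cs i fuel p comp = comp ++ pvEncode L := by
  intro fuel
  induction fuel with
  | zero => intro L p comp hp hL hlen; omega
  | succ f ih =>
    intro L p comp hp hL hlen
    by_cases h : p < (cs.length : Int)
    · have hLc := hL.trans (pvChunks_cons cs i p hi h)
      set sl := PySem.List.slice cs (some p) (some (p + i)) with hsl_def
      set L' := pvChunks cs i (p + i) with hL'_def
      have hsl : sl ≠ [] := pvSlice_ne_nil cs i p hi hp h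
      set k := (L'.takeWhile (fun d => d == sl)).length with hk_def
      have hcount := pvCount_spec cs i hi sl hsl L' (p + i) (by omega) rfl 1
      have hdropL : L'.dropWhile (fun d => d == sl) = pvChunks cs i (p + i + i * (k : Int)) := by
        rw [pvDropWhile_eq_drop, ← hk_def, hL'_def, pvChunks_drop cs i hi k (p + i) (by omega)]
      have hlen' : (L'.dropWhile (fun d => d == sl)).length < f := by
        have h1 := List.length_dropWhile_le (p := fun d => d == sl) (l := L')
        rw [hLc] at hlen
        simp at hlen
        omega
      have hrec := ih (L'.dropWhile (fun d => d == sl)) (p + i + i * (k : Int))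
        (if (1 : Int) + (k : Int) = 1 then comp ++ sl else comp ++ PySem.Int.toChars (1 + (k : Int)) ++ sl)
        (by positivity) hdropL hlen'
      rw [solutionComp]
      rw [if_pos h]
      simp only [← hsl_def, hcount]
      rw [hrec]
      rw [hLc, pvEncode]
      simp only [← hk_def]
      by_cases hk0 : k = 0
      · rw [if_pos (by omega), if_pos hk0, List.append_assoc]
      · rw [if_neg (by omega), if_neg hk0]
        simp [List.append_assoc]
    · have hnil := hL.trans (pvChunks_nil cs i p hi (by omega))
      rw [solutionComp, if_neg h, hnil]
      simp [pvEncode]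

lemma pvTakeWhile_replicate (l : List (List Char)) (c : List Char) :
    l.takeWhile (fun d => d == c) = List.replicate (l.takeWhile (fun d => d == c)).length c := by
  apply List.eq_replicate_of_mem
  intro b hb
  have := List.mem_takeWhile_imp hb
  simpa using this


-- B-side: structure of the break-position list

def pvCast1 (j : Nat) : Int := (j : Int) + 1

def pvNInterior (L : List (List Char)) : List Nat :=
  (List.range (L.length - 1)).filter (fun j => decide (L[j+1]? ≠ L[j]?))

lemma pvInterior_eq (L : List (List Char)) :
    pvInterior L = (pvNInterior L).map pvCast1 := by
  unfold pvInterior pvNInterior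
  rw [PySem.List.pyRange_one]
  have hN : (((L.length : Int)) - 1).toNat = L.length - 1 := by omega
  rw [hN, List.filter_map]
  rw [List.filter_congr (q := fun j => decide (L[j+1]? ≠ L[j]?)) ?_]
  · apply List.map_congr_left
    intro j _
    simp [pvCast1]
    ring
  · intro j _
    simp only [Function.comp]
    have h1 : (1 : Int) + (j : Int) = ((j + 1 : Nat) : Int) := by push_cast; ring
    simp only [h1]
    have h2 : ((j + 1 : Nat) : Int) - 1 = ((j : Nat) : Int) := by push_cast; ring
    simp only [h2]
    have h3 := PySem.List.pyGet?_natCast L (j + 1)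
    have h4 := PySem.List.pyGet?_natCast L j
    rw [h3, h4]

lemma pvNInterior_cons (c : List Char) (T : List (List Char)) (hT : T ≠ []) :
    pvNInterior (c :: T)
      = (if T.head? = some c then ([] : List Nat) else [0])
          ++ (pvNInterior T).map (· + 1) := by
  obtain ⟨d, T', rfl⟩ : ∃ d T', T = d :: T' := by
    cases T with
    | nil => simp at hT
    | cons d T' => exact ⟨d, T', rfl⟩
  unfold pvNInterior
  simp only [List.length_cons, Nat.add_sub_cancel]
  rw [List.range_succ_eq_map, List.filter_cons, List.filter_map]
  have hpred : ∀ j ∈ List.range T'.length,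
      ((fun j : Nat => decide ((c :: d :: T')[j+1]? ≠ (c :: d :: T')[j]?)) ∘ Nat.succ) j
        = (fun j : Nat => decide ((d :: T')[j+1]? ≠ (d :: T')[j]?)) j := by
    intro j _
    simp [Function.comp]
  rw [List.filter_congr hpred]
  have hmaps : ∀ (l : List Nat), l.map Nat.succ = l.map (· + 1) := by
    intro l
    simp
  rw [hmaps]
  by_cases hdc : d = c
  · subst hdc
    simp
  · simp [hdc]

lemma pvNInterior_run (c : List Char) (L' : List (List Char)) (k : Nat) (hk : 1 ≤ k)
    (hh : ∀ d, L'.head? = some d → d ≠ c) :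
    pvNInterior (List.replicate k c ++ L')
      = (if L' = [] then ([] : List Nat) else [k - 1])
          ++ (pvNInterior L').map (· + k) := by
  induction k with
  | zero => omega
  | succ k ih =>
    by_cases hk0 : k = 0
    · subst hk0
      rw [show List.replicate 1 c ++ L' = c :: L' by simp]
      by_cases hL' : L' = []
      · subst hL'
        simp [pvNInterior]
      · rw [pvNInterior_cons c L' hL']
        have : ¬ L'.head? = some c := by
          intro h
          exact hh c h rfl
        simp [hL', this]
    · have hk1 : 1 ≤ k := by omega
      rw [List.replicate_succ, List.cons_append]
      have hT : List.replicate k c ++ L' ≠ [] := by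
        simp [hk0]
      rw [pvNInterior_cons c _ hT]
      have hhead : (List.replicate k c ++ L').head? = some c := by
        cases k with
        | zero => omega
        | succ k => simp [List.replicate_succ]
      rw [if_pos hhead, List.nil_append, ih hk1]
      by_cases hL' : L' = []
      · simp [hL', List.map_map]
      · have hk2 : k - 1 + 1 = k := by omega
        simp [if_neg hL', List.map_map, hk2]

lemma pvDiffs_cons2 (a b : Int) (l : List Int) :
    pvDiffs (a :: b :: l) = (b - a) :: pvDiffs (b :: l) := by
  simp [pvDiffs]

lemma pvDiffs_map_add (t : Int) (l : List Int) :
    pvDiffs (l.map (· + t)) = pvDiffs l := by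
  induction l with
  | nil => simp [pvDiffs]
  | cons a l ih =>
    cases l with
    | nil => simp [pvDiffs]
    | cons b m =>
      rw [List.map_cons, List.map_cons, pvDiffs_cons2, pvDiffs_cons2]
      rw [show (b + t) :: List.map (fun x => x + t) m = (b :: m).map (· + t) from rfl, ih]
      congr 1
      ring

lemma pvDiffs_length (l : List Int) : (pvDiffs l).length = l.length - 1 := by
  cases l with
  | nil => simp [pvDiffs]
  | cons a l => simp [pvDiffs, List.length_zip]

lemma pvNInterior_nil : pvNInterior [] = [] := by
  simp [pvNInterior]

lemma pvBreaks_diffs :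
    ∀ (L : List (List Char)), L ≠ [] →
      pvDiffs ((0 : Int) :: (pvNInterior L).map pvCast1 ++ [(L.length : Int)])
        = (pvRuns L).map (fun r => (r.2 : Int)) := by
  intro L
  induction hm : L.length using Nat.strong_induction_on generalizing L with
  | _ m ih =>
  intro hL
  obtain ⟨c, rest, rfl⟩ := List.exists_cons_of_ne_nil hL
  subst hm
  set k := (rest.takeWhile (fun d => d == c)).length with hk
  set rest' := rest.dropWhile (fun d => d == c) with hrest'
  have hsplit : c :: rest = List.replicate (1 + k) c ++ rest' := by
    conv_lhs => rw [← List.takeWhile_append_dropWhile (p := fun d => d == c) (l := rest),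
      pvTakeWhile_replicate, ← hk, ← hrest']
    rw [← List.cons_append, ← List.replicate_succ, Nat.add_comm 1 k]
  have hh : ∀ d, rest'.head? = some d → d ≠ c := by
    intro d hd heq
    have := pvHead_dropWhile rest (fun d => d == c) d hd
    rw [heq] at this
    simp at this
  have hNI : pvNInterior (c :: rest)
      = (if rest' = [] then ([] : List Nat) else [1 + k - 1])
          ++ (pvNInterior rest').map (· + (1 + k)) := by
    rw [hsplit]
    exact pvNInterior_run c rest' (1 + k) (by omega) hh
  have hlen : (c :: rest).length = 1 + k + rest'.length := by
    rw [hsplit]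
    simp
  have hRuns : pvRuns (c :: rest) = (c, 1 + k) :: pvRuns rest' := by
    rw [pvRuns]
  by_cases hr' : rest' = []
  · rw [hNI, if_pos hr', hRuns, hr']
    simp [pvNInterior_nil, pvRuns, pvDiffs, hlen, hr']
  · have hr'lt : rest'.length < (c :: rest).length := by
      have := List.length_dropWhile_le (p := fun d => d == c) (l := rest)
      simp [hrest']
      omega
    have hrec := ih rest'.length hr'lt rest' rfl hr'
    rw [hNI, if_neg hr', hRuns]
    have hasm : (0 : Int) :: ([1 + k - 1] ++ (pvNInterior rest').map (· + (1 + k))).map pvCast1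
          ++ [((c :: rest).length : Int)]
        = 0 :: ((0 : Int) :: (pvNInterior rest').map pvCast1 ++ [(rest'.length : Int)]).map
            (· + ((1 + k : Nat) : Int)) := by
      simp only [List.map_append, List.map_cons, List.map_map, List.map_nil, List.nil_append,
        List.cons_append]
      congr 1
      congr 1
      · simp [pvCast1]
        omega
      congr 1
      · apply List.map_congr_left
        intro j _
        simp [Function.comp, pvCast1]
        ring
      · simp [hlen]
        ring
    rw [hasm]
    rcases hb : ((0 : Int) :: (pvNInterior rest').map pvCast1 ++ [(rest'.length : Int)])
      with _ | ⟨b0, tB⟩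
    · simp at hb
    have hb0 : b0 = 0 := by
      have := congrArg List.head? hb
      simp at this
      omega
    rw [List.map_cons, pvDiffs_cons2, hb0]
    rw [show ((0 : Int) + ((1 + k : Nat) : Int)) :: tB.map (· + ((1 + k : Nat) : Int))
        = (((0 : Int) :: tB).map (· + ((1 + k : Nat) : Int))) from rfl]
    rw [← hb0, ← hb, pvDiffs_map_add, hrec]
    simp

lemma pvEncode_len :
    ∀ (L : List (List Char)),
      ((pvEncode L).length : Int)
        = ((pvRuns L).map (fun r => (r.1.length : Int)
            + (if 1 < (r.2 : Int) then ((PySem.Int.toChars (r.2 : Int)).length : Int) else 0))).sum := by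
  intro L
  induction hm : L.length using Nat.strong_induction_on generalizing L with
  | _ m ih =>
  cases L with
  | nil => simp [pvEncode, pvRuns]
  | cons c rest =>
    rw [pvEncode, pvRuns]
    set k := (rest.takeWhile (fun d => d == c)).length with hk
    set rest' := rest.dropWhile (fun d => d == c) with hrest'
    have hlt : rest'.length < m := by
      have := List.length_dropWhile_le (p := fun d => d == c) (l := rest)
      simp [← hm, hrest']
      omega
    have hrec := ih rest'.length hlt rest' rfl
    by_cases hk0 : k = 0
    · rw [if_pos hk0]
      simp only [List.map_cons, List.sum_cons, List.length_append]
      push_cast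
      rw [hrec, if_neg (by omega : ¬ (1 : Int) < 1 + (k : Int))]
      ring
    · rw [if_neg hk0]
      simp only [List.map_cons, List.sum_cons, List.length_append]
      push_cast
      rw [hrec, if_pos (by omega : (1 : Int) < 1 + (k : Int))]
      ring

-- geometry: the representatives of the runs of the chunk list at p sum to (n - p) - i*(m - r)
lemma pvRunsSum (cs : List Char) (i : Int) (hi : 0 < i) :
    ∀ (p : Int), 0 ≤ p → p ≤ (cs.length : Int) →
      ((pvRuns (pvChunks cs i p)).map (fun r => (r.1.length : Int))).sum
        = (cs.length : Int) - p
            - i * (((pvChunks cs i p).length : Int) - ((pvRuns (pvChunks cs i p)).length : Int)) := by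
  intro p
  induction hm : cs.length - p.toNat using Nat.strong_induction_on generalizing p with
  | _ m ih =>
  intro hp hpn
  by_cases hlt : p < (cs.length : Int)
  · rw [pvChunks_cons cs i p hi hlt]
    set c := PySem.List.slice cs (some p) (some (p + i)) with hc
    set rest := pvChunks cs i (p + i) with hrest
    rw [pvRuns]
    set k := (rest.takeWhile (fun d => d == c)).length with hk
    set rest' := rest.dropWhile (fun d => d == c) with hrest'
    have hdrop : rest' = pvChunks cs i (p + i + i * (k : Int)) := by
      rw [hrest', pvDropWhile_eq_drop, ← hk, hrest, pvChunks_drop cs i hi k (p + i) (by omega)]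
    have hclen := pvSlice_len cs i p hi hp hlt
    have hreslen : rest.length = k + rest'.length := by
      have := List.takeWhile_append_dropWhile (p := fun d => d == c) (l := rest)
      have hlen := congrArg List.length this
      simp [← hk, ← hrest'] at hlen
      omega
    by_cases hcase : (cs.length : Int) < p + i
    · have hrnil : rest = [] := by
        rw [hrest]
        exact pvChunks_nil cs i (p + i) hi (by omega)
      have hk0 : k = 0 := by simp [hk, hrnil]
      have hr'nil : rest' = [] := by simp [hrest', hrnil]
      simp only [hrnil, hr'nil, hk0]
      simp [pvRuns]
      rw [min_eq_left (by omega : (cs.length : Int) ≤ p + i)] at hclen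
      omega
    · have hpi : p + i ≤ (cs.length : Int) := by omega
      have hclen2 : (c.length : Int) = i := by
        rw [hclen]
        omega
      -- the last chunk of the run is full, so the run ends at or before n
      have hp' : p + i + i * (k : Int) ≤ (cs.length : Int) := by
        by_cases hk0 : k = 0
        · simp [hk0]
          omega
        · have hk1 : 1 ≤ k := by omega
          have hrep : rest.takeWhile (fun d => d == c) = List.replicate k c := by
            rw [pvTakeWhile_replicate, ← hk]
          have hsplit : rest = List.replicate k c ++ rest' := by
            conv_lhs => rw [← List.takeWhile_append_dropWhile (p := fun d => d == c) (l := rest)]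
            rw [hrep, ← hrest']
          have hdropk : rest.drop (k - 1) = c :: rest' := by
            rw [hsplit, List.drop_append_of_le_length (by simp), List.drop_replicate]
            rw [show k - (k - 1) = 1 by omega]
            simp
          have hq : rest.drop (k - 1) = pvChunks cs i (p + i + i * ((k - 1 : Nat) : Int)) := by
            rw [hrest, pvChunks_drop cs i hi (k - 1) (p + i) (by omega)]
          set q := p + i + i * ((k - 1 : Nat) : Int) with hqd
          have hqlt : q < (cs.length : Int) := by
            by_contra hge
            have := pvChunks_nil cs i q hi (by omega)
            rw [← hq, hdropk] at this
            simp at this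
          have hhead : pvChunks cs i q = PySem.List.slice cs (some q) (some (q + i)) :: pvChunks cs i (q + i) :=
            pvChunks_cons cs i q hi hqlt
          have hceq : PySem.List.slice cs (some q) (some (q + i)) = c := by
            have := hq.symm.trans hdropk
            rw [hhead] at this
            exact (List.cons.injEq .. ▸ this).1
          have hq0 : 0 ≤ q := by positivity
          have hqlen := pvSlice_len cs i q hi hq0 hqlt
          rw [hceq, hclen2] at hqlen
          have hqi : q + i ≤ (cs.length : Int) := by omega
          have : q + i = p + i + i * (k : Int) := by
            rw [hqd]
            have : ((k - 1 : Nat) : Int) = (k : Int) - 1 := by omega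
            rw [this]
            ring
          omega
      have hik : 0 ≤ i * (k : Int) := by positivity
      have hrec := ih (cs.length - (p + i + i * (k : Int)).toNat)
        (by omega) (p + i + i * (k : Int)) rfl (by positivity) hp'
      rw [← hdrop] at hrec
      simp only [List.map_cons, List.sum_cons, List.length_cons]
      rw [hrec, hclen2, hdrop]
      rw [← hdrop]
      simp only [hreslen]
      push_cast
      ring
  · have hpe : p = (cs.length : Int) := by omega
    rw [pvChunks_nil cs i p hi (by omega)]
    simp [pvRuns]
    omega

lemma pvZipSum (Z : List (Int × Int)) :
    ((Z.filter (fun ab => decide (1 < ab.2 - ab.1))).map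
        (fun ab => ((PySem.Int.toChars (ab.2 - ab.1)).length : Int))).sum
      = ((Z.map (fun ab => ab.2 - ab.1)).map
          (fun d => if 1 < d then ((PySem.Int.toChars d).length : Int) else 0)).sum := by
  induction Z with
  | nil => simp
  | cons ab Z ih =>
    by_cases h : 1 < ab.2 - ab.1 <;> simp [h, ih]

-- per block size i the two loop bodies compute the same number
lemma pvBody_eq (cs : List Char) (i : Int) (hi : 1 ≤ i) (hn : 0 < (cs.length : Int)) :
    ((solutionComp cs i (cs.length + 1) 0 []).length : Int)
      = (let chunks := (PySem.List.pyRange 0 ((cs.length : Int)) i).map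
           (fun j => PySem.List.slice cs (some j) (some (j + i)))
         let m : Int := (chunks.length : Int)
         let breaks : List Int := [0] ++ ((PySem.List.pyRange 1 m 1).filter
             (fun k => decide (PySem.List.pyGet? chunks k ≠ PySem.List.pyGet? chunks (k - 1)))) ++ [m]
         let runs : Int := (breaks.length : Int) - 1
         let digits : Int := (((breaks.zip (PySem.List.slice breaks (some 1) none)).filter
             (fun ab => decide (1 < ab.2 - ab.1))).map
             (fun ab => ((PySem.Int.toChars (ab.2 - ab.1)).length : Int))).sum
         (cs.length : Int) - i * (m - runs) + digits) := by
  have hi0 : 0 < i := by omega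
  have hchunks : (PySem.List.pyRange 0 ((cs.length : Int)) i).map
      (fun j => PySem.List.slice cs (some j) (some (j + i))) = pvChunks cs i 0 := rfl
  have hlenL := pvChunks_len cs i hi0 0 (le_refl 0)
  have hA := pvComp_spec cs i hi0 (cs.length + 1) (pvChunks cs i 0) 0 []
    (le_refl 0) rfl (by omega)
  have hLne : pvChunks cs i 0 ≠ [] := by
    rw [pvChunks_cons cs i 0 hi0 hn]
    simp
  dsimp only
  rw [hchunks, hA]
  simp only [List.nil_append]
  have hIeq := pvInterior_eq (pvChunks cs i 0)
  unfold pvInterior at hIeq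
  rw [hIeq, PySem.List.slice_from_one]
  rw [show ([(0 : Int)] ++ (pvNInterior (pvChunks cs i 0)).map pvCast1
        ++ [((pvChunks cs i 0).length : Int)])
      = ((0 : Int) :: (pvNInterior (pvChunks cs i 0)).map pvCast1
        ++ [((pvChunks cs i 0).length : Int)]) from by simp]
  set B := (0 : Int) :: (pvNInterior (pvChunks cs i 0)).map pvCast1
      ++ [((pvChunks cs i 0).length : Int)] with hB
  have hdiffs := pvBreaks_diffs (pvChunks cs i 0) hLne
  rw [← hB] at hdiffs
  have hdig : (((B.zip B.tail).filter (fun ab => decide (1 < ab.2 - ab.1))).map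
        (fun ab => ((PySem.Int.toChars (ab.2 - ab.1)).length : Int))).sum
      = ((pvRuns (pvChunks cs i 0)).map
          (fun r => if 1 < (r.2 : Int) then ((PySem.Int.toChars (r.2 : Int)).length : Int) else 0)).sum := by
    rw [pvZipSum]
    rw [show (B.zip B.tail).map (fun ab => ab.2 - ab.1) = pvDiffs B from rfl]
    rw [hdiffs, List.map_map]
    rfl
  rw [hdig]
  have hruns : (B.length : Int) - 1 = ((pvRuns (pvChunks cs i 0)).length : Int) := by
    have h1 := congrArg List.length hdiffs
    rw [pvDiffs_length] at h1
    simp only [List.length_map] at h1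
    have h2 : B.length = (pvNInterior (pvChunks cs i 0)).length + 2 := by
      rw [hB]
      simp
    omega
  rw [hruns]
  have hsum := pvRunsSum cs i hi0 0 (le_refl 0) (by omega)
  rw [pvEncode_len (pvChunks cs i 0), PySem.List.sum_map_add_int, hsum]
  ring

-- ===== VERDICT (by name: the statement is the Claim_ definition above) =====
theorem solution_spec : Claim_equal_solution := by
  intro s _
  unfold Spec_solution solution solution_alt
  refine PySem.List.foldl_congr_mem _ _ _ _ ?_
  intro acc x hx
  obtain ⟨hx1, hx2⟩ := PySem.List.mem_pyRange_one.mp hx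
  have hn : 0 < (s.toList.length : Int) := by omega
  have h := pvBody_eq s.toList x hx1 hn
  simp only at h ⊢
  rw [← h]
  rcases lt_or_ge ((solutionComp s.toList x (s.toList.length + 1) 0 []).length : Int) acc with h2 | h2
  · simp [min_def]
    omega
  · simp [min_def]
    omega
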